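-- pv_equiv track=rewrite | github.com/Dhinesh-Kumar8/python_exercises | flash/file.py | duplicate_finder
-- ===== SOURCE A (Python) =====
-- def duplicate_finder(google):
--     Number = google
--     duke = []
--     for num in sorted(list(set(Number))) :
--         mylist = []
--         for num2 in Number:
--             if num == num2:
--                 mylist.append(num)
--         duke.append(mylist)
--     return duke
-- ===== SOURCE B (Python) =====
-- def duplicate_finder(google):
--     s = sorted(google)
--     result = []
--     run = []
--     for x in s:
--         if run and run[0] != x:
--             result.append(run)
--             run = []
--         run.append(x)
--     if run:
--         result.append(run)
--     return result
-- ===== Notes on version B (the rewrite author's own statement) =====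
-- stated objective: faster
-- what changed: Replaces the outer loop over sorted distinct values with its inner full rescan of the list by one sort of the whole list followed by a single linear pass grouping consecutive equal elements.
import Mathlib
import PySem

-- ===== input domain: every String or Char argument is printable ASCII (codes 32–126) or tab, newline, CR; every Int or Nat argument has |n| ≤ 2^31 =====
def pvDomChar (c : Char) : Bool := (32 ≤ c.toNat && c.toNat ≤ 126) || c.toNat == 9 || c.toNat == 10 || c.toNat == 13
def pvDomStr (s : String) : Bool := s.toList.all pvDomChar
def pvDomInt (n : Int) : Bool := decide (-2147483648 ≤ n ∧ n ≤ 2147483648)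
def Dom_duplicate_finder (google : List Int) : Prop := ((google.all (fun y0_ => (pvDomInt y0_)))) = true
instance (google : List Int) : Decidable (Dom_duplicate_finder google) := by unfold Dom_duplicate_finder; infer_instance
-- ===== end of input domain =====

-- B sorts the whole list once and groups consecutive equal elements in one pass,
-- instead of A's loop over the sorted distinct values with a full rescan of the list per value (objective: faster).

-- ===== PORT A =====
def duplicate_finder (google : List Int) : List (List Int) :=
  (PySem.List.sorted (PySem.Set.ofList google) (fun x => x) false).foldl
    (fun duke num =>
      duke ++ [google.foldl (fun mylist num2 => if num == num2 then mylist ++ [num] else mylist) []])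
    []

-- ===== PORT B =====
def duplicate_finder_alt (google : List Int) : List (List Int) :=
  let s := PySem.List.sorted google (fun x => x) false
  let st := s.foldl (fun (st : List (List Int) × List Int) x =>
      let st' := if st.2 ≠ [] ∧ st.2.headI ≠ x then (st.1 ++ [st.2], ([] : List Int)) else st
      (st'.1, st'.2 ++ [x])) ([], [])
  if st.2 ≠ [] then st.1 ++ [st.2] else st.1

-- ===== PRECONDITION & SPEC =====
def Spec_duplicate_finder (google : List Int) (out : List (List Int)) : Prop := out = duplicate_finder_alt google
instance (google : List Int) (out : List (List Int)) : Decidable (Spec_duplicate_finder google out) := by unfold Spec_duplicate_finder; infer_instance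

-- ===== CLAIM (what is proved, stated in full; the proofs are below) =====
def Claim_equal_duplicate_finder : Prop := ∀ (google : List Int), Dom_duplicate_finder google → Spec_duplicate_finder google (duplicate_finder google)

-- ===== LEMMAS AND PROOFS =====

-- the run-grouping state machine of B, as a recursive function (proof helper)
def runsAux (v : Int) (n : Nat) : List Int → List (List Int)
  | [] => [List.replicate n v]
  | x :: xs => if x = v then runsAux v (n + 1) xs else List.replicate n v :: runsAux x 1 xs

-- flatMap expansion of a (value, multiplicity) list (proof helper)
def expandL : List (Int × Nat) → List Int
  | [] => []
  | (v, n) :: t => List.replicate n v ++ expandL t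

-- B's fold body and final flush, named for the proofs (definitionally the ones in the port)
def bStep (st : List (List Int) × List Int) (x : Int) : List (List Int) × List Int :=
  let st' := if st.2 ≠ [] ∧ st.2.headI ≠ x then (st.1 ++ [st.2], ([] : List Int)) else st
  (st'.1, st'.2 ++ [x])

def bFlush (st : List (List Int) × List Int) : List (List Int) :=
  if st.2 ≠ [] then st.1 ++ [st.2] else st.1

lemma inner_foldl (v : Int) : ∀ (g : List Int) (a : List Int),
    g.foldl (fun mylist num2 => if v == num2 then mylist ++ [v] else mylist) a
      = a ++ List.replicate (g.count v) v
  | [], a => by simp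
  | x :: g, a => by
    simp only [List.foldl_cons]
    by_cases h : v = x
    · subst h
      rw [if_pos (by simp), inner_foldl v g]
      simp [List.replicate_succ, List.append_assoc]
    · rw [if_neg (by simpa using h), inner_foldl v g]
      simp [Ne.symm h]

lemma foldl_bStep_runsAux : ∀ (s : List Int) (res : List (List Int)) (v : Int) (n : Nat),
    bFlush (s.foldl bStep (res, List.replicate (n + 1) v)) = res ++ runsAux v (n + 1) s
  | [], res, v, n => by simp [bFlush, runsAux, List.replicate_succ]
  | x :: s, res, v, n => by
    by_cases h : v = x
    · subst h
      have : bStep (res, List.replicate (n + 1) v) v = (res, List.replicate (n + 2) v) := by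
        simp only [bStep]
        rw [if_neg (by simp [List.replicate_succ])]
        show (res, List.replicate (n + 1) v ++ [v]) = _
        rw [← List.replicate_succ']
      rw [List.foldl_cons, this, foldl_bStep_runsAux s res v (n + 1)]
      simp [runsAux]
    · have : bStep (res, List.replicate (n + 1) v) x
          = (res ++ [List.replicate (n + 1) v], List.replicate 1 x) := by
        simp [bStep, List.replicate_succ, h]
      rw [List.foldl_cons, this, foldl_bStep_runsAux s _ x 0]
      simp [runsAux, List.append_assoc]
      intro hh; exact absurd hh.symm h

lemma runsAux_replicate (v : Int) : ∀ (j : Nat) (n : Nat) (r : List Int),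
    runsAux v n (List.replicate j v ++ r) = runsAux v (n + j) r
  | 0, n, r => by simp
  | j + 1, n, r => by
    simp only [List.replicate_succ, List.cons_append, runsAux, if_true,
      runsAux_replicate v j (n + 1) r]
    congr 1
    omega

lemma mem_expandL {u : Int} : ∀ {l : List (Int × Nat)}, u ∈ expandL l → ∃ p ∈ l, u = p.1
  | [], h => by simp [expandL] at h
  | (v, n) :: t, h => by
    simp only [expandL, List.mem_append, List.mem_replicate] at h
    rcases h with ⟨-, rfl⟩ | h
    · exact ⟨(u, n), by simp⟩
    · obtain ⟨p, hp, rfl⟩ := mem_expandL h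
      exact ⟨p, by simp [hp]⟩

lemma runsAux_expand : ∀ (l : List (Int × Nat)) (v : Int) (n : Nat),
    (∀ p ∈ l, 0 < p.2) → l.IsChain (fun p q => p.1 ≠ q.1) →
    (∀ p ∈ l.head?, v ≠ p.1) →
    runsAux v n (expandL l) = List.replicate n v :: l.map (fun p => List.replicate p.2 p.1)
  | [], v, n, _, _, _ => by simp [expandL, runsAux]
  | (u, m) :: t, v, n, hpos, hch, hne => by
    have hm : 0 < m := hpos (u, m) (by simp)
    obtain ⟨m', rfl⟩ : ∃ m', m = m' + 1 := ⟨m - 1, by omega⟩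
    have hvu : v ≠ u := by simpa using hne (u, m' + 1) (by simp)
    simp only [expandL, List.replicate_succ, List.cons_append, runsAux, if_neg (Ne.symm hvu),
      runsAux_replicate u m' 1]
    rw [show 1 + m' = m' + 1 by omega,
      runsAux_expand t u (m' + 1) (fun p hp => hpos p (by simp [hp]))
        (hch.tail ..) (fun p hp => by
          cases t with
          | nil => simp at hp
          | cons q t' =>
            simp at hp; subst hp
            exact (List.isChain_cons_cons.mp hch).1)]
    simp

lemma count_expand_map (g : List Int) (u : Int) : ∀ (D : List Int), D.Nodup →
    (expandL (D.map fun v => (v, g.count v))).count u = if u ∈ D then g.count u else 0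
  | [], _ => by simp [expandL]
  | v :: D, hnd => by
    simp only [List.map_cons, expandL, List.count_append, List.count_replicate,
      count_expand_map g u D hnd.of_cons]
    by_cases h : u = v
    · subst h
      simp [(List.nodup_cons.mp hnd).1]
    · simp [h, Ne.symm h]

lemma pairwise_le_expand : ∀ (l : List (Int × Nat)),
    l.Pairwise (fun p q => p.1 ≤ q.1) → (expandL l).Pairwise (· ≤ ·)
  | [], _ => by simp [expandL]
  | (v, n) :: t, hp => by
    simp only [expandL]
    apply List.pairwise_append.mpr
    refine ⟨?_, pairwise_le_expand t (hp.of_cons), ?_⟩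
    · exact List.pairwise_replicate.mpr (by simp)
    · intro a ha b hb
      obtain ⟨-, rfl⟩ := List.mem_replicate.mp ha
      obtain ⟨p, hpmem, rfl⟩ := mem_expandL hb
      exact (List.pairwise_cons.mp hp).1 p hpmem

-- ===== VERDICT (by name: the statement is the Claim_ definition above) =====
theorem duplicate_finder_spec : Claim_equal_duplicate_finder := by
  intro g _
  show duplicate_finder g = duplicate_finder_alt g
  have hDlt : (PySem.List.sorted (PySem.Set.ofList g) (fun x => x) false).Pairwise (· < ·) :=
    PySem.List.sorted_ofList_pairwise_lt g
  have hmemD : ∀ u, u ∈ PySem.List.sorted (PySem.Set.ofList g) (fun x => x) false ↔ u ∈ g := by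
    intro u
    rw [PySem.List.mem_sorted, PySem.Set.mem_ofList]
  -- A computes the per-value runs over the sorted distinct values
  have hA : duplicate_finder g
      = ((PySem.List.sorted (PySem.Set.ofList g) (fun x => x) false).map
          (fun v => (v, g.count v))).map (fun p => List.replicate p.2 p.1) := by
    unfold duplicate_finder
    rw [PySem.List.foldl_append_singleton_eq_map, List.map_map]
    exact List.map_congr_left (fun v _ => by rw [inner_foldl v g []]; simp)
  -- the whole sorted list is the expansion of the (value, count) list
  have hperm : (expandL ((PySem.List.sorted (PySem.Set.ofList g) (fun x => x) false).map
      (fun v => (v, g.count v)))).Perm g := by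
    rw [List.perm_iff_count]
    intro u
    rw [count_expand_map g u _ (hDlt.imp ne_of_lt)]
    by_cases hu : u ∈ PySem.List.sorted (PySem.Set.ofList g) (fun x => x) false
    · simp [hu]
    · simp [hu, List.count_eq_zero.mpr (fun hm => hu ((hmemD u).mpr hm))]
  have hs : PySem.List.sorted g (fun x => x) false
      = expandL ((PySem.List.sorted (PySem.Set.ofList g) (fun x => x) false).map
          (fun v => (v, g.count v))) := by
    refine PySem.List.sorted_id_eq_of_perm_of_pairwise g _ hperm ?_
    refine pairwise_le_expand _ ?_
    rw [List.pairwise_map]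
    exact hDlt.imp le_of_lt
  have hBdef : duplicate_finder_alt g
      = bFlush ((PySem.List.sorted g (fun x => x) false).foldl bStep ([], [])) := rfl
  rcases hDc : PySem.List.sorted (PySem.Set.ofList g) (fun x => x) false with - | ⟨v, Dt⟩
  · -- no distinct values: g is empty
    have hg : g = [] := by
      cases g with
      | nil => rfl
      | cons x t =>
        exact absurd ((hmemD x).mpr (by simp)) (by rw [hDc]; simp)
    subst hg
    decide
  · -- g is nonempty; its smallest value is v
    have hvg : v ∈ g := (hmemD v).mp (by rw [hDc]; simp)
    obtain ⟨c', hc'⟩ : ∃ c', g.count v = c' + 1 :=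
      ⟨g.count v - 1, by have := List.count_pos_iff.mpr hvg; omega⟩
    rw [hDc] at hA hs
    have hscons : PySem.List.sorted g (fun x => x) false
        = v :: (List.replicate c' v ++ expandL (Dt.map (fun u => (u, g.count u)))) := by
      rw [hs]; simp [expandL, hc', List.replicate_succ]
    have h1 : bStep ([], []) v = ([], List.replicate (0 + 1) v) := by
      simp [bStep, List.replicate_succ]
    rw [hBdef, hscons, List.foldl_cons, h1, foldl_bStep_runsAux _ [] v 0,
      runsAux_replicate, List.nil_append, show 0 + 1 + c' = c' + 1 from by omega]
    have hPcons : List.Pairwise (· < ·) (v :: Dt) := hDc ▸ hDlt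
    rw [runsAux_expand (Dt.map (fun u => (u, g.count u))) v (c' + 1)
      (fun p hp => by
        obtain ⟨u, hu, rfl⟩ := List.mem_map.mp hp
        exact List.count_pos_iff.mpr ((hmemD u).mp (by rw [hDc]; simp [hu]))
      )
      (List.isChain_map_of_isChain _ (fun a b hab => by simpa using ne_of_lt hab)
        (hPcons.of_cons.isChain))
      (fun p hp => by
        cases Dt with
        | nil => simp at hp
        | cons u t' =>
          simp at hp; subst hp
          exact ne_of_lt ((List.pairwise_cons.mp hPcons).1 u (by simp))
      )]
    rw [hA]
    simp [hc']
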